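-- pv_equiv track=rewrite | github.com/tborzyszkowski/PythonWyklad | ProjektyStudentow/2019_Vitaliy_Mysak/parser.py | transformMultipleLambdas
-- ===== SOURCE A (Python) =====
-- LAMBDA_SYMBOL = '->'
--
-- LAMBDA_DECL   = '\\'
--
-- def transformMultipleLambdas(s: str) -> str:
-- 	re = ''
-- 	last_lambda = False
-- 	buff = ''
-- 	for i, c in enumerate(s):
-- 		if last_lambda:
-- 			buff += c
-- 			if s.endswith(LAMBDA_SYMBOL, 0, i + 1):
-- 				buff = buff[:-(len(LAMBDA_SYMBOL))].strip()
-- 				buff = buff.replace(' ', ' {} {}'.format(LAMBDA_SYMBOL, LAMBDA_DECL)) + ' '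
-- 				re += buff + LAMBDA_SYMBOL
--
-- 				buff = ''
-- 				last_lambda = False
-- 		else:
-- 			if c == LAMBDA_DECL:
-- 				last_lambda = True
-- 			re += c
-- 	return re
-- ===== SOURCE B (Python) =====
-- LAMBDA_SYMBOL = '->'
--
-- LAMBDA_DECL   = '\\'
--
-- def transformMultipleLambdas(s: str) -> str:
-- 	# Partition-based rewrite: jump from '\' to the next '->' instead of a
-- 	# char-by-char state machine.
-- 	out = []
-- 	rest = s
-- 	while True:
-- 		head, sep, rest = rest.partition(LAMBDA_DECL)
-- 		out.append(head)
-- 		if not sep: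
-- 			break
-- 		out.append(LAMBDA_DECL)
-- 		body, sep2, rest = rest.partition(LAMBDA_SYMBOL)
-- 		if not sep2:
-- 			break  # unterminated lambda: everything after '\' is dropped
-- 		out.append(body.strip().replace(' ', ' {} {}'.format(LAMBDA_SYMBOL, LAMBDA_DECL)) + ' ' + LAMBDA_SYMBOL)
-- 	return ''.join(out)
-- ===== Notes on version B (the rewrite author's own statement) =====
-- stated objective: alternative
-- what changed: Replaced the char-by-char enumerate state machine (last_lambda flag, growing buff, per-char endswith check on a prefix slice) with a partition-based scan that jumps directly from each '\' to the next '->' and rewrites the segment in one step.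
import Mathlib
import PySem

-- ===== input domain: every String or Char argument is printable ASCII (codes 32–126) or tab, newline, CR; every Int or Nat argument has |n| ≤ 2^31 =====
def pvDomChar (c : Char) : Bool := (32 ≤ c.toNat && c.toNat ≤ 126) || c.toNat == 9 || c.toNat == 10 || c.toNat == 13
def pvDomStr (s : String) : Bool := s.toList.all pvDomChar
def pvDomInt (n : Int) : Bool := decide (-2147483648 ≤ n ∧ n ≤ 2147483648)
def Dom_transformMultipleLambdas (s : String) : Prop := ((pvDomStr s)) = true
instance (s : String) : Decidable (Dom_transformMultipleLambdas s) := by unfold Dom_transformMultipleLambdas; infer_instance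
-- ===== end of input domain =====

-- B replaces A's char-by-char state machine by a partition-based scan that jumps
-- from each '\' to the next '->' (objective: alternative decomposition).

-- ===== PORT A =====
-- LAMBDA_SYMBOL = '->'
def lamSym : List Char := ['-', '>']
-- LAMBDA_DECL = '\'
def lamDecl : List Char := ['\\']

-- loop body of A's `for i, c in enumerate(s)`; state = (re, last_lambda, buff)
def aStep (l : List Char) (st : List Char × Bool × List Char) (ic : Int × Char) :
    List Char × Bool × List Char :=
  let re := st.1
  let lastLambda := st.2.1
  let buff := st.2.2
  let i := ic.1
  let c := ic.2
  if lastLambda then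
    let buff := buff ++ [c]
    -- s.endswith(LAMBDA_SYMBOL, 0, i + 1)
    if PySem.Chars.endswith (PySem.List.slice l none (some (i + 1))) lamSym then
      -- buff[:-len(LAMBDA_SYMBOL)].strip()
      let buff := PySem.Chars.strip (PySem.List.slice buff none (some (-(PySem.Chars.len lamSym))))
      -- buff.replace(' ', ' {} {}'.format(LAMBDA_SYMBOL, LAMBDA_DECL)) + ' '
      let buff := PySem.Chars.replace buff [' '] ([' '] ++ lamSym ++ [' '] ++ lamDecl) ++ [' ']
      -- re += buff + LAMBDA_SYMBOL ; buff = '' ; last_lambda = False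
      (re ++ buff ++ lamSym, false, [])
    else
      (re, true, buff)
  else
    -- if c == LAMBDA_DECL: last_lambda = True ; re += c
    let lastLambda := if c = '\\' then true else lastLambda
    (re ++ [c], lastLambda, buff)

def transformMultipleLambdas (s : String) : String :=
  String.ofList (List.foldl (aStep s.toList) ([], false, []) (PySem.List.enumerate s.toList 0)).1

-- ===== PORT B =====
-- hand port of str.partition('\'): exact — splits at the first '\';
-- Bool = separator found (Python's middle component non-empty)
def partBS : List Char → List Char × Bool × List Char
  | [] => ([], false, [])
  | c :: r =>
    if c = '\\' then ([], true, r)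
    else
      let p := partBS r
      (c :: p.1, p.2.1, p.2.2)

-- hand port of str.partition('->'): exact — splits at the FIRST occurrence of '->';
-- none = separator absent (Python's ('', '') tail)
def partArrow : List Char → Option (List Char × List Char)
  | [] => none
  | [_] => none
  | c :: d :: r =>
    if c = '-' ∧ d = '>' then some ([], r)
    else (partArrow (d :: r)).map fun p => (c :: p.1, p.2)

theorem partBS_rest_length {l h r : List Char} (e : partBS l = (h, true, r)) :
    r.length < l.length := by
  induction l generalizing h r with
  | nil => simp [partBS] at e
  | cons c l ih =>
    by_cases hc : c = '\\'
    · rw [partBS, if_pos hc] at e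
      injection e with e1 e23
      injection e23 with e2 e3
      subst e3
      simp only [List.length_cons]; omega
    · rcases hp : partBS l with ⟨h', f', r'⟩
      simp only [partBS, if_neg hc, hp, Prod.mk.injEq] at e
      obtain ⟨hh, hf, hr⟩ := e
      subst hr
      have := ih (hf ▸ hp)
      simp only [List.length_cons] at this ⊢; omega

theorem partArrow_rest_length {l b r : List Char} (e : partArrow l = some (b, r)) :
    r.length < l.length := by
  induction l using partArrow.induct generalizing b r with
  | case1 => simp [partArrow] at e
  | case2 => simp [partArrow] at e
  | case3 c d t hcd =>
    simp only [partArrow, if_pos hcd, Option.some.injEq, Prod.mk.injEq] at e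
    obtain ⟨hb, hr⟩ := e
    subst hr
    simp only [List.length_cons]; omega
  | case4 c d t hcd ih =>
    simp only [partArrow, if_neg hcd] at e
    rcases hp : partArrow (d :: t) with _ | ⟨a1, a2⟩
    · rw [hp] at e; simp at e
    · rw [hp] at e
      simp only [Option.map_some, Option.some.injEq, Prod.mk.injEq] at e
      obtain ⟨hb, hr⟩ := e
      have := ih hp
      subst hr
      simp only [List.length_cons] at this ⊢; omega

-- the `while True` loop of B, on the remaining suffix; `out` becomes the result list
def bLoop (rest : List Char) : List Char :=
  match hbs : partBS rest with
  | (head, false, _) => head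
  | (head, true, r1) =>
    head ++ '\\' ::
      (match har : partArrow r1 with
       | none => []  -- unterminated lambda: break, dropping the tail
       | some (body, r2) =>
         -- body.strip().replace(' ', ' -> \') + ' ->'
         PySem.Chars.replace (PySem.Chars.strip body) [' '] ([' '] ++ lamSym ++ [' '] ++ lamDecl)
           ++ [' '] ++ lamSym ++ bLoop r2)
termination_by rest.length
decreasing_by
  have h1 := partBS_rest_length hbs
  have h2 := partArrow_rest_length har
  omega

def transformMultipleLambdas_alt (s : String) : String :=
  String.ofList (bLoop s.toList)

-- ===== PRECONDITION & SPEC =====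
def Spec_transformMultipleLambdas (s : String) (out : String) : Prop := out = transformMultipleLambdas_alt s
instance (s : String) (out : String) : Decidable (Spec_transformMultipleLambdas s out) := by unfold Spec_transformMultipleLambdas; infer_instance

-- ===== CLAIM (what is proved, stated in full; the proofs are below) =====
def Claim_equal_transformMultipleLambdas : Prop := ∀ (s : String), Dom_transformMultipleLambdas s → Spec_transformMultipleLambdas s (transformMultipleLambdas s)

-- ===== LEMMAS AND PROOFS =====

-- the common rewritten segment, as both programs emit it
def pvTrans (body : List Char) : List Char :=
  PySem.Chars.replace (PySem.Chars.strip body) [' '] ([' '] ++ lamSym ++ [' '] ++ lamDecl)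
    ++ [' '] ++ lamSym

theorem bLoop_nil : bLoop [] = [] := by
  rw [bLoop.eq_def]
  repeat' split
  all_goals simp_all [partBS]

theorem bLoop_cons_ne {c : Char} (h : ¬ c = '\\') (t : List Char) :
    bLoop (c :: t) = c :: bLoop t := by
  rcases hp : partBS t with ⟨head, found, r1⟩
  have hcons : partBS (c :: t) = (c :: head, found, r1) := by
    simp [partBS, h, hp]
  rw [bLoop.eq_def, bLoop.eq_def (rest := t)]
  repeat' split
  all_goals simp_all

theorem bLoop_bs (t : List Char) :
    bLoop ('\\' :: t) = '\\' ::
      (match partArrow t with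
       | none => []
       | some (body, r2) => pvTrans body ++ bLoop r2) := by
  have hcons : partBS ('\\' :: t) = ([], true, t) := by simp [partBS]
  rw [bLoop.eq_def]
  split
  · rename_i head snd heq
    rw [hcons] at heq
    simp at heq
  · rename_i head r1 heq
    rw [hcons] at heq
    simp only [Prod.mk.injEq] at heq
    obtain ⟨h1, -, h3⟩ := heq
    subst h1; subst h3
    simp only [List.nil_append]
    congr 1
    split
    · rename_i heq2
      simp [heq2]
    · rename_i body r2 heq2
      simp [heq2, pvTrans, List.append_assoc]

theorem ends_concat (p0 seg : List Char) (c : Char) :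
    PySem.Chars.endswith (p0 ++ '\\' :: (seg ++ [c])) lamSym = true ↔
      (∃ b, seg = b ++ ['-']) ∧ c = '>' := by
  rw [PySem.Chars.endswith_iff]
  constructor
  · rintro ⟨u, hu⟩
    have hu' : (u.concat '-').concat '>' = (p0 ++ '\\' :: seg).concat c := by
      simpa [lamSym, List.concat_eq_append, List.append_assoc] using hu
    rw [List.concat_inj] at hu'
    obtain ⟨h1, rfl⟩ := hu'
    rcases List.eq_nil_or_concat seg with rfl | ⟨b, x, rfl⟩
    · exfalso
      have h2 : u.concat '-' = p0.concat '\\' := by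
        simpa [List.concat_eq_append] using h1
      rw [List.concat_inj] at h2
      exact absurd h2.2 (by decide)
    · have h2 : u.concat '-' = (p0 ++ '\\' :: b).concat x := by
        simpa [List.concat_eq_append, List.append_assoc] using h1
      rw [List.concat_inj] at h2
      exact ⟨⟨b, by rw [← h2.2, List.concat_eq_append]⟩, rfl⟩
  · rintro ⟨⟨b, rfl⟩, rfl⟩
    exact ⟨p0 ++ '\\' :: b, by simp [lamSym]⟩

theorem SA_decomp {l b r : List Char} (e : partArrow l = some (b, r)) :
    l = b ++ '-' :: '>' :: r := by
  induction l using partArrow.induct generalizing b r with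
  | case1 => simp [partArrow] at e
  | case2 => simp [partArrow] at e
  | case3 c d t hcd =>
    simp only [partArrow, if_pos hcd, Option.some.injEq, Prod.mk.injEq] at e
    obtain ⟨hb, hr⟩ := e
    obtain ⟨rfl, rfl⟩ := hcd
    rw [← hb, ← hr]
    simp
  | case4 c d t hcd ih =>
    simp only [partArrow, if_neg hcd] at e
    rcases hp : partArrow (d :: t) with _ | ⟨a1, a2⟩
    · rw [hp] at e; simp at e
    · rw [hp] at e
      simp only [Option.map_some, Option.some.injEq, Prod.mk.injEq] at e
      obtain ⟨hb, hr⟩ := e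
      have hdcmp := ih hp
      subst hr
      rw [← hb]
      rw [hdcmp]
      simp

theorem SA_fire {b : List Char} (h : partArrow (b ++ ['-']) = none) (t : List Char) :
    partArrow (b ++ '-' :: '>' :: t) = some (b, t) := by
  induction b with
  | nil => simp [partArrow]
  | cons x b' ih =>
    cases b' with
    | nil =>
      simp [partArrow]
    | cons y b'' =>
      simp only [List.cons_append] at h ⊢
      have hxy : ¬ (x = '-' ∧ y = '>') := by
        intro hxy
        rw [partArrow, if_pos hxy] at h
        simp at h
      rw [partArrow, if_neg hxy] at h
      rw [Option.map_eq_none_iff] at h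
      rw [partArrow, if_neg hxy]
      have h2 := ih (by simpa only [List.cons_append] using h)
      rw [show y :: (b'' ++ '-' :: '>' :: t) = (y :: b'') ++ '-' :: '>' :: t from rfl]
      rw [h2]
      rfl

theorem SA_step {seg : List Char} {c : Char} (h : partArrow seg = none)
    (hc : ¬ ((∃ b, seg = b ++ ['-']) ∧ c = '>')) :
    partArrow (seg ++ [c]) = none := by
  induction seg using partArrow.induct with
  | case1 => simp [partArrow]
  | case2 x =>
    have hx : ¬ (x = '-' ∧ c = '>') := by
      rintro ⟨rfl, rfl⟩
      exact hc ⟨⟨[], rfl⟩, rfl⟩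
    simp [partArrow, hx]
  | case3 x d t hcd => simp [partArrow, if_pos hcd] at h
  | case4 x d t hcd ih =>
    simp only [List.cons_append] at hc ⊢
    rw [partArrow, if_neg hcd] at h
    rw [Option.map_eq_none_iff] at h
    rw [partArrow, if_neg hcd]
    rw [Option.map_eq_none_iff]
    have hc' : ¬ ((∃ b, d :: t = b ++ ['-']) ∧ c = '>') := by
      rintro ⟨⟨b, hb⟩, rfl⟩
      exact hc ⟨⟨x :: b, by rw [hb, List.cons_append]⟩, rfl⟩
    simpa only [List.cons_append] using ih h hc'

theorem aStep_copy (l re buff : List Char) (i : Int) (c : Char) :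
    aStep l (re, false, buff) (i, c) = (re ++ [c], if c = '\\' then true else false, buff) := rfl

theorem aStep_lam (l re seg : List Char) (i : Int) (c : Char) :
    aStep l (re, true, seg) (i, c) =
      if PySem.Chars.endswith (PySem.List.slice l none (some (i + 1))) lamSym then
        (re ++ (PySem.Chars.replace
            (PySem.Chars.strip (PySem.List.slice (seg ++ [c]) none (some (-(PySem.Chars.len lamSym)))))
            [' '] ([' '] ++ lamSym ++ [' '] ++ lamDecl) ++ [' ']) ++ lamSym, false, [])
      else (re, true, seg ++ [c]) := rfl

theorem sliceNeg2 (b : List Char) :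
    PySem.List.slice (b ++ ['-', '>']) none (some (-(PySem.Chars.len lamSym))) = b := by
  rw [show -(PySem.Chars.len lamSym) = (-2 : Int) from by decide]
  rw [PySem.List.slice_to_neg_ofNat _ 2 (by norm_num)]
  simp

theorem lamPhase : ∀ (t seg p0 re : List Char),
    partArrow seg = none →
    List.foldl (aStep (p0 ++ '\\' :: (seg ++ t))) (re, true, seg)
        (PySem.List.enumerate t ((p0.length + 1 + seg.length : Nat) : Int)) =
      match partArrow (seg ++ t) with
      | none => (re, true, seg ++ t)
      | some (body, r2) =>
          List.foldl (aStep (p0 ++ '\\' :: (seg ++ t))) (re ++ pvTrans body, false, [])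
            (PySem.List.enumerate r2
              ((p0.length + 1 + seg.length + t.length - r2.length : Nat) : Int)) := by
  intro t
  induction t with
  | nil =>
    intro seg p0 re H
    simp only [List.append_nil, H]
    simp [PySem.List.enumerate]
  | cons c t' ih =>
    intro seg p0 re H
    rw [PySem.List.enumerate_cons, List.foldl_cons, aStep_lam]
    have hsl : PySem.List.slice (p0 ++ '\\' :: (seg ++ c :: t')) none
        (some (((p0.length + 1 + seg.length : Nat) : Int) + 1)) = p0 ++ '\\' :: (seg ++ [c]) := by
      rw [show ((p0.length + 1 + seg.length : Nat) : Int) + 1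
            = ((p0.length + 1 + seg.length + 1 : Nat) : Int) from by push_cast; ring]
      rw [PySem.List.slice_to_natCast]
      rw [show p0 ++ '\\' :: (seg ++ c :: t') = (p0 ++ '\\' :: (seg ++ [c])) ++ t' from by simp]
      have hlen : (p0 ++ '\\' :: (seg ++ [c])).length = p0.length + 1 + seg.length + 1 := by
        simp only [List.length_append, List.length_cons, List.length_nil]; omega
      rw [List.take_left' hlen]
    rw [hsl]
    by_cases hcnd : (∃ b, seg = b ++ ['-']) ∧ c = '>'
    · rw [if_pos ((ends_concat p0 seg c).mpr hcnd)]
      obtain ⟨⟨b, rfl⟩, rfl⟩ := hcnd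
      rw [show (b ++ ['-']) ++ ['>'] = b ++ ['-', '>'] from by simp, sliceNeg2]
      have hfire : partArrow ((b ++ ['-']) ++ '>' :: t') = some (b, t') := by
        rw [show (b ++ ['-']) ++ '>' :: t' = b ++ '-' :: '>' :: t' from by simp]
        exact SA_fire H t'
      rw [hfire]
      have hst : ((p0.length + 1 + (b ++ ['-']).length : Nat) : Int) + 1
          = ((p0.length + 1 + (b ++ ['-']).length + (('>' :: t').length) - t'.length : Nat) : Int) := by
        simp only [List.length_append, List.length_cons, List.length_nil]; omega
      rw [hst]
      simp only [pvTrans, List.append_assoc]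
    · rw [if_neg (by rw [ends_concat]; exact hcnd)]
      have H' := SA_step H hcnd
      have hIH := ih (seg ++ [c]) p0 re H'
      have hcast : ((p0.length + 1 + seg.length : Nat) : Int) + 1
          = ((p0.length + 1 + (seg ++ [c]).length : Nat) : Int) := by
        simp only [List.length_append, List.length_cons, List.length_nil]
        push_cast; ring
      rw [hcast]
      rw [show p0 ++ '\\' :: (seg ++ c :: t') = p0 ++ '\\' :: ((seg ++ [c]) ++ t') from by simp]
      rw [show seg ++ c :: t' = (seg ++ [c]) ++ t' from by simp]
      rw [hIH]
      rcases hA : partArrow ((seg ++ [c]) ++ t') with _ | ⟨body, r2⟩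
      · simp
      · simp only [List.length_append, List.length_cons, List.length_nil]
        have e2 : p0.length + 1 + (seg.length + 1) + t'.length - r2.length
            = p0.length + 1 + seg.length + (t'.length + 1) - r2.length := by omega
        rw [e2]

theorem copyPhase : ∀ (n : Nat) (t p0 re : List Char), t.length ≤ n →
    (List.foldl (aStep (p0 ++ t)) (re, false, [])
        (PySem.List.enumerate t ((p0.length : Nat) : Int))).1 = re ++ bLoop t := by
  intro n
  induction n with
  | zero =>
    intro t p0 re hle
    have ht : t = [] := List.length_eq_zero_iff.mp (Nat.le_zero.mp hle)
    subst ht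
    simp [PySem.List.enumerate, bLoop_nil]
  | succ n ih =>
    intro t p0 re hle
    cases t with
    | nil => simp [PySem.List.enumerate, bLoop_nil]
    | cons c t' =>
      rw [PySem.List.enumerate_cons, List.foldl_cons, aStep_copy]
      by_cases hc : c = '\\'
      · subst hc
        rw [if_pos rfl]
        have hlam := lamPhase t' [] p0 (re ++ ['\\']) rfl
        simp only [List.nil_append, List.length_nil, Nat.add_zero] at hlam
        have hcast : ((p0.length : Nat) : Int) + 1 = ((p0.length + 1 : Nat) : Int) := by
          push_cast; ring
        rw [hcast]
        rcases hA : partArrow t' with _ | ⟨body, r2⟩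
        · simp only [hA] at hlam
          rw [hlam]
          rw [bLoop_bs, hA]
        · simp only [hA] at hlam
          rw [hlam]
          have hd := SA_decomp hA
          have hlen : r2.length ≤ n := by
            have h1 : t'.length ≤ n := by simpa using Nat.le_of_succ_le_succ hle
            have h2 : t'.length = body.length + 2 + r2.length := by
              rw [hd]; simp only [List.length_append, List.length_cons]; omega
            omega
          have hIH := ih r2 (p0 ++ '\\' :: body ++ ['-', '>']) (re ++ ['\\'] ++ pvTrans body) hlen
          have hl2 : (p0 ++ '\\' :: body ++ ['-', '>']) ++ r2 = p0 ++ '\\' :: t' := by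
            rw [hd]; simp
          rw [hl2] at hIH
          have hc2 : ((p0.length + 1 + t'.length - r2.length : Nat) : Int)
              = (((p0 ++ '\\' :: body ++ ['-', '>']).length : Nat) : Int) := by
            rw [hd]; simp only [List.length_append, List.length_cons, List.length_nil]; omega
          rw [hc2]
          rw [hIH]
          rw [bLoop_bs, hA]
          simp [List.append_assoc]
      · rw [if_neg hc]
        have hIH := ih t' (p0 ++ [c]) (re ++ [c]) (by simpa using Nat.le_of_succ_le_succ hle)
        have hcast : ((p0.length : Nat) : Int) + 1 = (((p0 ++ [c]).length : Nat) : Int) := by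
          simp only [List.length_append, List.length_cons, List.length_nil]
          push_cast; ring
        rw [hcast]
        rw [show p0 ++ c :: t' = (p0 ++ [c]) ++ t' from by simp]
        rw [hIH]
        rw [bLoop_cons_ne hc]
        simp

-- ===== VERDICT (by name: the statement is the Claim_ definition above) =====
theorem transformMultipleLambdas_spec : Claim_equal_transformMultipleLambdas := by
  intro s _
  unfold Spec_transformMultipleLambdas transformMultipleLambdas transformMultipleLambdas_alt
  have h := copyPhase s.toList.length s.toList [] [] (le_refl _)
  simp only [List.nil_append, List.length_nil, Nat.cast_zero] at h
  rw [h]
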